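-- pv_equiv track=rewrite | github.com/mbollmann/sonnet-finder | sonnet_finder.py | get_stress_and_boundaries
-- ===== SOURCE A (Python) =====
-- def get_stress_and_boundaries(pron):
--     """Determines stress patterns and word boundaries."""
--
--     # For stress pattern, look at all vowel phonemes, and preserve word
--     # boundaries (for now)
--     pattern = [phon[-1] for phon in pron if phon[-1] in "012" or phon == " "]
--     pattern = (
--         "".join(pattern)
--         .replace("2", "1")  # treat secondary stress like primary stress
--         .replace("100 ", "101 ")  # treat 100 at the end of a word like 101,
--         # cf. https://aclanthology.org/D16-1126, §3
--     )
--     if pattern[-3:] == "100":  # same as above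
--         pattern = pattern[:-3] + "101"
--
--     # For each vowel, produce "1" if it's at the beginning of a word and "0"
--     # otherwise; used to make sure the candidates we extract coincide with word
--     # boundaries
--     bound = "".join(
--         "1" if b == " " else "0" for (a, b) in zip(pattern, " " + pattern) if a != " "
--     )
--
--     # For each vowel, remember which word (by index) it belongs to so we can
--     # more easily extract the corresponding words later
--     i = 0
--     wordidx = []
--     for p in pattern:
--         if p == " ":
--             i += 1
--         else:
--             wordidx.append(i)
--     wordidx.append(len(pattern))
--
--     pattern = pattern.replace(" ", "")
--
--     return pattern, bound, wordidx
-- ===== SOURCE B (Python) =====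
-- def get_stress_and_boundaries(pron):
--     """Determines stress patterns and word boundaries."""
--
--     pattern = [phon[-1] for phon in pron if phon[-1] in "012" or phon == " "]
--     pattern = (
--         "".join(pattern)
--         .replace("2", "1")
--         .replace("100 ", "101 ")
--     )
--     if pattern[-3:] == "100":
--         pattern = pattern[:-3] + "101"
--
--     # One fused pass over `pattern`: strip the spaces, mark word-initial
--     # vowels and record word indices, tracking whether the previous
--     # character was a space (i.e. whether we are at the start of a word).
--     stripped = []
--     bound = []
--     wordidx = []
--     word = 0
--     at_start = True
--     for p in pattern:
--         if p == " ":
--             word += 1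
--             at_start = True
--         else:
--             stripped.append(p)
--             bound.append("1" if at_start else "0")
--             wordidx.append(word)
--             at_start = False
--     wordidx.append(len(pattern))
--
--     return "".join(stripped), "".join(bound), wordidx
-- ===== Notes on version B (the rewrite author's own statement) =====
-- stated objective: alternative
-- what changed: A derives boundaries, word indices and the space-stripped pattern in three separate passes (a zip-with-shifted-string scan, a space-counting loop, and a .replace); B makes one fused pass over the pattern with an at-word-start flag that produces all three at once; the stress-pattern construction is unchanged.
-- outside the precondition, e.g. on get_stress_and_boundaries(['']): A raises IndexError, B raises IndexError
import Mathlib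
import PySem

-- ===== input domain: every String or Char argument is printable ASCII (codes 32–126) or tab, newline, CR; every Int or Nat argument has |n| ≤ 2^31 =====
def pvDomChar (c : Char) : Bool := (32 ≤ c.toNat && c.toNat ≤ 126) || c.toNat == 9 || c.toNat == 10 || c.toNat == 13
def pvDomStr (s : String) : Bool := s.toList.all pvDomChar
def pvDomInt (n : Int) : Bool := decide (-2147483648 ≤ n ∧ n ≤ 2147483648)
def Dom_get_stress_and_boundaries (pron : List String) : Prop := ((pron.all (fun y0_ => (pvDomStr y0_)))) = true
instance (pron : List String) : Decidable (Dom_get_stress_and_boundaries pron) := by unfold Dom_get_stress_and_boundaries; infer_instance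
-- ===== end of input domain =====

-- B replaces A's three separate passes over the pattern (zip-with-shifted-string boundary
-- scan, space-counting index loop, space-stripping replace) by ONE fused pass with an
-- at-word-start flag; the stress-pattern construction itself is unchanged. Objective:
-- alternative decomposition; same asymptotic cost. Return-value equivalence only (neither
-- version mutates its argument).

-- ===== PORT A =====

-- shared first phase, transliterated from A: the comprehension, the two .replace calls
-- and the trailing "100" fix (B's Python contains the identical lines)
def pvPattern (pron : List String) : List Char :=
  let pattern1 : List Char := pron.foldl (fun acc phon =>
    match PySem.Str.pyGet? phon (-1) with
    | none => acc  -- Python raises IndexError here; excluded by Pre_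
    | some c =>
        if PySem.Str.isIn (String.mk [c]) "012" || phon == " " then acc ++ [c] else acc) []
  let pattern2 := PySem.Chars.replace (PySem.Chars.replace pattern1 ['2'] ['1'])
      ['1','0','0',' '] ['1','0','1',' ']
  if PySem.List.slice pattern2 (some (-3)) none == ['1','0','0'] then
    PySem.List.slice pattern2 none (some (-3)) ++ ['1','0','1']
  else pattern2

def get_stress_and_boundaries (pron : List String) : String × String × List Int :=
  let pattern := pvPattern pron
  let bound : List Char := (pattern.zip (' ' :: pattern)).foldl
      (fun acc ab => if ab.1 != ' ' then acc ++ [if ab.2 == ' ' then '1' else '0'] else acc) []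
  let st := pattern.foldl (fun (st : Int × List Int) p =>
      if p == ' ' then (st.1 + 1, st.2) else (st.1, st.2 ++ [st.1])) ((0 : Int), ([] : List Int))
  let wordidx := st.2 ++ [(pattern.length : Int)]
  let pattern' := PySem.Chars.replace pattern [' '] []
  (String.mk pattern', String.mk bound, wordidx)

-- ===== PORT B =====
def get_stress_and_boundaries_alt (pron : List String) : String × String × List Int :=
  let pattern := pvPattern pron
  let st := pattern.foldl
      (fun (st : List Char × List Char × List Int × Int × Bool) p =>
        if p == ' ' then (st.1, st.2.1, st.2.2.1, st.2.2.2.1 + 1, true)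
        else (st.1 ++ [p], st.2.1 ++ [if st.2.2.2.2 then '1' else '0'],
              st.2.2.1 ++ [st.2.2.2.1], st.2.2.2.1, false))
      (([] : List Char), ([] : List Char), ([] : List Int), (0 : Int), true)
  (String.mk st.1, String.mk st.2.1, st.2.2.1 ++ [(pattern.length : Int)])

-- ===== PRECONDITION & SPEC =====
-- Pre_ excludes exactly the inputs containing an empty string, on which A's phon[-1]
-- raises IndexError (B raises there too).
def Pre_get_stress_and_boundaries (pron : List String) : Prop := ∀ p ∈ pron, p.toList ≠ []
instance (pron : List String) : Decidable (Pre_get_stress_and_boundaries pron) := by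
  unfold Pre_get_stress_and_boundaries; infer_instance

def pvWitness_get_stress_and_boundaries : List String :=
  ["HH", "AH0", "L", "OW1", " ", "W", "ER2", "L", "D"]

def Spec_get_stress_and_boundaries (pron : List String) (out : String × String × List Int) : Prop := out = get_stress_and_boundaries_alt pron
instance (pron : List String) (out : String × String × List Int) : Decidable (Spec_get_stress_and_boundaries pron out) := by unfold Spec_get_stress_and_boundaries; infer_instance

-- ===== CLAIM (what is proved, stated in full; the proofs are below) =====
def Claim_equal_get_stress_and_boundaries : Prop := ∀ (pron : List String), Dom_get_stress_and_boundaries pron → Pre_get_stress_and_boundaries pron → Spec_get_stress_and_boundaries pron (get_stress_and_boundaries pron)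

-- ===== LEMMAS AND PROOFS =====

-- closed forms of the three per-character results, as structural recursions
def pvStrip : List Char → List Char
  | [] => []
  | c :: t => if c == ' ' then pvStrip t else c :: pvStrip t

def pvBound : Bool → List Char → List Char
  | _, [] => []
  | flag, c :: t => if c == ' ' then pvBound true t
      else (if flag then '1' else '0') :: pvBound false t

def pvWidx : Int → List Char → List Int
  | _, [] => []
  | i, c :: t => if c == ' ' then pvWidx (i + 1) t else i :: pvWidx i t

-- A's space-stripping replace computes pvStrip
lemma replace_go_space (fuel : Nat) (l acc : List Char) (h : l.length ≤ fuel) :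
    PySem.Chars.replace.go [' '] [] fuel l acc = acc.reverse ++ pvStrip l := by
  induction fuel generalizing l acc with
  | zero =>
      cases l with
      | nil => simp [PySem.Chars.replace.go, pvStrip]
      | cons c t => simp at h
  | succ n ih =>
      cases l with
      | nil => simp [PySem.Chars.replace.go, pvStrip]
      | cons c t =>
          simp only [List.length_cons] at h
          by_cases hc : c = ' '
          · subst hc
            simp [PySem.Chars.replace.go, List.isPrefixOf, ih t acc (by omega), pvStrip]
          · simp [PySem.Chars.replace.go, List.isPrefixOf, Ne.symm hc, hc,
                  ih t (c :: acc) (by omega), pvStrip]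

lemma replace_space (l : List Char) :
    PySem.Chars.replace l [' '] [] = pvStrip l := by
  simp [PySem.Chars.replace, replace_go_space l.length l [] le_rfl]

-- A's zip-with-shifted-list boundary fold computes pvBound
lemma boundA_eq (cs : List Char) (p : Char) (acc : List Char) :
    (cs.zip (p :: cs)).foldl
      (fun acc ab => if ab.1 != ' ' then acc ++ [if ab.2 == ' ' then '1' else '0'] else acc) acc
    = acc ++ pvBound (p == ' ') cs := by
  induction cs generalizing p acc with
  | nil => simp [pvBound]
  | cons c t ih =>
      by_cases hc : c = ' '
      · subst hc; simpa [pvBound] using ih ' ' acc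
      · have hb : (c == ' ') = false := by simp [hc]
        simpa [pvBound, hc, hb, List.append_assoc] using
          ih c (acc ++ [if p == ' ' then '1' else '0'])

-- A's word-index fold computes pvWidx
lemma widxA_eq (cs : List Char) (i : Int) (acc : List Int) :
    (cs.foldl (fun (st : Int × List Int) p =>
      if p == ' ' then (st.1 + 1, st.2) else (st.1, st.2 ++ [st.1])) (i, acc)).2
    = acc ++ pvWidx i cs := by
  induction cs generalizing i acc with
  | nil => simp [pvWidx]
  | cons c t ih =>
      by_cases hc : c = ' '
      · subst hc; simpa [pvWidx] using ih (i + 1) acc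
      · simpa [pvWidx, hc, List.append_assoc] using ih i (acc ++ [i])

-- B's fused fold computes all three at once
lemma fusedB_eq (cs : List Char) (S B : List Char) (W : List Int) (i : Int) (flag : Bool) :
    ∃ i' f', cs.foldl
      (fun (st : List Char × List Char × List Int × Int × Bool) p =>
        if p == ' ' then (st.1, st.2.1, st.2.2.1, st.2.2.2.1 + 1, true)
        else (st.1 ++ [p], st.2.1 ++ [if st.2.2.2.2 then '1' else '0'],
              st.2.2.1 ++ [st.2.2.2.1], st.2.2.2.1, false))
      (S, B, W, i, flag)
    = (S ++ pvStrip cs, B ++ pvBound flag cs, W ++ pvWidx i cs, i', f') := by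
  induction cs generalizing S B W i flag with
  | nil => exact ⟨i, flag, by simp [pvStrip, pvBound, pvWidx]⟩
  | cons c t ih =>
      by_cases hc : c = ' '
      · subst hc
        obtain ⟨i', f', h⟩ := ih S B W (i + 1) true
        exact ⟨i', f', by simpa [pvStrip, pvBound, pvWidx] using h⟩
      · obtain ⟨i', f', h⟩ := ih (S ++ [c]) (B ++ [if flag then '1' else '0']) (W ++ [i]) i false
        exact ⟨i', f', by simpa [pvStrip, pvBound, pvWidx, hc, List.append_assoc] using h⟩

-- ===== VERDICT (by name: the statement is the Claim_ definition above) =====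
theorem get_stress_and_boundaries_spec : Claim_equal_get_stress_and_boundaries := by
  intro pron _ _
  unfold Spec_get_stress_and_boundaries get_stress_and_boundaries get_stress_and_boundaries_alt
  obtain ⟨i', f', hB⟩ := fusedB_eq (pvPattern pron) [] [] [] 0 true
  simp only [hB, replace_space, widxA_eq, boundA_eq]
  simp
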